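-- pv_equiv track=rewrite | github.com/won-N-only/algorithm_python | 백준/Silver/2885. 초콜릿 식사/초콜릿 식사.py | choco
-- ===== SOURCE A (Python) =====
-- def power(k):
--     for i in range(1, 21):
--         if 2**i >= k:
--             return 2**i
--
-- def choco(k):
--     cnt = 0
--     last_chocolate = 1
--     while k > 0:
--         last_chocolate = power(k) // 2
--         cnt += 1
--         if k - last_chocolate >= 0:
--             k -= last_chocolate
--     return cnt
-- ===== SOURCE B (Python) =====
-- def choco(k):
--     if k <= 0:
--         return 0
--     t = 0
--     while k % 2 == 0:
--         k //= 2
--         t += 1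
--     ones = 0
--     while k > 0:
--         ones += k % 2
--         k //= 2
--     return ones + t
-- ===== Notes on version B (the rewrite author's own statement) =====
-- stated objective: simpler
-- what changed: Replaces the greedy subtract-largest-power-of-two loop (with its linear-scan power() helper recomputing powers on every call) by direct binary-digit extraction: strip trailing zero bits, then count set bits, returning ones plus trailing zeros.
-- crash fix: For k above the range of A's power() helper the helper returns None and A raises TypeError ('NoneType // int'); B returns the ordinary count (set bits plus trailing zero bits) there. — e.g. on choco(1048577): A raises TypeError, B returns 2
import Mathlib
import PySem

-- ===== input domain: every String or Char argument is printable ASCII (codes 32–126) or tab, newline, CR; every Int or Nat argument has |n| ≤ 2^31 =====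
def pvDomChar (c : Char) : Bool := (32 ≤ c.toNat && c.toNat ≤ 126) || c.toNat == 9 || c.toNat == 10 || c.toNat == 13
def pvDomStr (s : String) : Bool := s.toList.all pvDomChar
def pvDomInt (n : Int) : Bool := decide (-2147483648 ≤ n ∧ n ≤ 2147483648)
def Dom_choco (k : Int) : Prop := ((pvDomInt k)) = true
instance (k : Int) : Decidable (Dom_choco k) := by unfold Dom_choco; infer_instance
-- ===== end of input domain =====

-- B replaces A's greedy subtract-largest-power-of-two loop by direct binary-digit
-- extraction (trailing zero bits plus set bits); equivalence is claimed on the k where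
-- A returns normally (beyond power()'s range A gets None back and raises TypeError).

-- ===== PORT A =====
-- for i in range(1, 21): if 2**i >= k: return 2**i      (falls off the end -> None)
def powerLoop (k : Int) : List Int → Option Int
  | [] => none
  | i :: rest =>
    if (2:Int) ^ i.toNat ≥ k then some ((2:Int) ^ i.toNat) else powerLoop k rest

def power (k : Int) : Option Int := powerLoop k (PySem.List.pyRange 1 21 1)

-- while k > 0: last = power(k)//2; cnt += 1; if k-last >= 0: k -= last
-- fuel (k.toNat+1) only makes the recursion structurally total; it is never exhausted
-- on inputs where the Python loop terminates.  power k = none is where Python raises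
-- TypeError; those inputs are excluded by Pre_choco.
def chocoLoop : Nat → Int → Int → Int → Int
  | 0, _, cnt, _ => cnt
  | fuel+1, k, cnt, _last =>
    if k > 0 then
      match power k with
      | none => cnt
      | some p =>
        let last' := PySem.Int.floordiv p 2
        if k - last' ≥ 0 then chocoLoop fuel (k - last') (cnt + 1) last'
        else chocoLoop fuel k (cnt + 1) last'
    else cnt

def choco (k : Int) : Int := chocoLoop (k.toNat + 1) k 0 1

-- ===== PORT B =====
-- while k % 2 == 0: k //= 2; t += 1      (entered with k > 0, so k stays > 0)
def tzB (n : Nat) (t : Int) : Nat × Int :=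
  if h : n % 2 = 0 ∧ 0 < n then tzB (n / 2) (t + 1) else (n, t)
termination_by n
decreasing_by exact Nat.div_lt_self h.2 (by omega)

-- while k > 0: ones += k % 2; k //= 2
def onesB (n : Nat) (ones : Int) : Int :=
  if h : 0 < n then onesB (n / 2) (ones + ((n % 2 : Nat) : Int)) else ones
termination_by n
decreasing_by exact Nat.div_lt_self h (by omega)

def choco_alt (k : Int) : Int :=
  if k ≤ 0 then 0
  else
    let p := tzB k.toNat 0
    onesB p.1 0 + p.2

-- ===== PRECONDITION & SPEC =====
-- Pre_choco excludes exactly the k on which A raises TypeError: for k beyond the last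
-- power its helper scans, power() falls off its loop and returns None, so None-floordiv raises.
def Pre_choco (k : Int) : Prop := k ≤ 2 ^ 20
instance (k : Int) : Decidable (Pre_choco k) := by unfold Pre_choco; infer_instance

def pvWitness_choco : Int := 90

def Spec_choco (k : Int) (out : Int) : Prop := out = choco_alt k
instance (k : Int) (out : Int) : Decidable (Spec_choco k out) := by unfold Spec_choco; infer_instance

-- Where A's power() helper returns None, A raises TypeError; B returns the ordinary
-- count (set bits plus trailing zero bits) there.
def Raises_choco (k : Int) : Prop := 2 ^ 20 < k
instance (k : Int) : Decidable (Raises_choco k) := by unfold Raises_choco; infer_instance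
def pvRaiseWitness_choco : Int := 1048577
def pvRaiseWitnessOut_choco : Int := 2

-- ===== CLAIM (what is proved, stated in full; the proofs are below) =====
def Claim_equal_choco : Prop := ∀ (k : Int), Dom_choco k → Pre_choco k → Spec_choco k (choco k)
def Claim_raises_choco : Prop := (∀ (k : Int), Dom_choco k → Raises_choco k → ¬ Pre_choco k) ∧ (Dom_choco (pvRaiseWitness_choco) ∧ Raises_choco (pvRaiseWitness_choco) ∧ choco_alt (pvRaiseWitness_choco) = pvRaiseWitnessOut_choco)

-- ===== LEMMAS AND PROOFS =====

-- B's value as a function of the Nat argument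
def SB (n : Nat) : Int := onesB (tzB n 0).1 0 + (tzB n 0).2

-- popcount, the value onesB accumulates
def pc (n : Nat) : Int :=
  if h : 0 < n then ((n % 2 : Nat) : Int) + pc (n / 2) else 0
termination_by n
decreasing_by exact Nat.div_lt_self h (by omega)

-- A's per-iteration subtrahend: the power of two power(k)//2
def clP (n : Nat) : Nat := max 1 (Nat.clog 2 n)

theorem onesB_eq (n : Nat) : ∀ a : Int, onesB n a = a + pc n := by
  induction n using Nat.strong_induction_on with
  | _ n ih =>
    intro a
    rw [onesB, pc]
    by_cases h : 0 < n
    · rw [dif_pos h, dif_pos h, ih (n / 2) (Nat.div_lt_self h (by omega))]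
      ring
    · rw [dif_neg h, dif_neg h]; ring

theorem tzB_acc (n : Nat) : ∀ t : Int, tzB n t = ((tzB n 0).1, t + (tzB n 0).2) := by
  induction n using Nat.strong_induction_on with
  | _ n ih =>
    intro t
    by_cases h : n % 2 = 0 ∧ 0 < n
    · have e1 : ∀ s : Int, tzB n s = tzB (n / 2) (s + 1) := fun s => by rw [tzB, dif_pos h]
      rw [e1 t, e1 0, ih (n / 2) (Nat.div_lt_self h.2 (by omega)) (t + 1),
          ih (n / 2) (Nat.div_lt_self h.2 (by omega)) (0 + 1)]
      refine Prod.ext rfl ?_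
      simp only
      ring
    · have e1 : ∀ s : Int, tzB n s = (n, s) := fun s => by rw [tzB, dif_neg h]
      rw [e1 t, e1 0]
      refine Prod.ext rfl ?_
      simp only
      ring

theorem tzB_odd (n : Nat) (t : Int) (h : n % 2 = 1) : tzB n t = (n, t) := by
  rw [tzB, dif_neg (by omega)]

theorem tzB_even (n : Nat) (t : Int) (h : n % 2 = 0) (h0 : 0 < n) :
    tzB n t = tzB (n / 2) (t + 1) := by
  rw [tzB, dif_pos ⟨h, h0⟩]

theorem SB_odd (n : Nat) (h : n % 2 = 1) : SB n = pc n := by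
  rw [SB, tzB_odd n 0 h]
  simp [onesB_eq]

theorem SB_even (a : Nat) (h0 : 0 < a) : SB (2 * a) = SB a + 1 := by
  rw [SB, tzB_even (2 * a) 0 (by omega) (by omega)]
  rw [show (2 * a) / 2 = a by omega, tzB_acc a (0 + 1), SB]
  simp only
  ring

theorem pc_zero : pc 0 = 0 := by rw [pc]; simp

theorem pc_two_mul (a : Nat) : pc (2 * a) = pc a := by
  by_cases h : 0 < a
  · rw [pc, dif_pos (by omega : 0 < 2 * a)]
    rw [show (2 * a) % 2 = 0 by omega, show (2 * a) / 2 = a by omega]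
    simp
  · have : a = 0 := by omega
    subst this; rfl

theorem pc_two_mul_add_one (a : Nat) : pc (2 * a + 1) = pc a + 1 := by
  rw [pc, dif_pos (by omega : 0 < 2 * a + 1)]
  rw [show (2 * a + 1) % 2 = 1 by omega, show (2 * a + 1) / 2 = a by omega]
  push_cast; ring

-- removing the top bit of m (with 2^e ≤ m < 2^(e+1)) lowers the popcount by one
theorem pc_sub_top (e : Nat) : ∀ m : Nat, 2 ^ e ≤ m → m < 2 ^ (e + 1) → pc m = pc (m - 2 ^ e) + 1 := by
  induction e with
  | zero =>
    intro m h1 h2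
    have hm : m = 1 := by omega
    subst hm
    simp [pc_zero, show pc 1 = 1 by rw [pc]; simp [pc_zero]]
  | succ e ih =>
    intro m h1 h2
    obtain ⟨a, r, hm2, hrlt⟩ : ∃ a r, m = 2 * a + r ∧ r < 2 :=
      ⟨m / 2, m % 2, by omega, by omega⟩
    subst hm2
    have hx : (2:Nat) ^ (e + 1) = 2 * 2 ^ e := by ring
    have hx2 : (2:Nat) ^ (e + 1 + 1) = 2 * (2 * 2 ^ e) := by ring
    have hia : 2 ^ e ≤ a := by omega
    have hia2 : a < 2 ^ (e + 1) := by omega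
    have key := ih a hia hia2
    have hsub : 2 * a + r - 2 ^ (e + 1) = 2 * (a - 2 ^ e) + r := by omega
    rw [hsub]
    have hr2 : r = 0 ∨ r = 1 := by omega
    rcases hr2 with h | h
    · rw [h, Nat.add_zero, Nat.add_zero, pc_two_mul, pc_two_mul, key]
    · rw [h, pc_two_mul_add_one, pc_two_mul_add_one, key]

theorem clog_eq_of (c m : Nat) (h1 : 2 ^ (c - 1) < m) (h2 : m ≤ 2 ^ c) (hc : 1 ≤ c) :
    Nat.clog 2 m = c := by
  have hle : Nat.clog 2 m ≤ c := (Nat.le_pow_iff_clog_le (by omega)).mp h2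
  have hlt : c - 1 < Nat.clog 2 m := (Nat.pow_lt_iff_lt_clog (by omega)).mp h1
  omega

theorem clP_pos (n : Nat) : 1 ≤ clP n := le_max_left 1 _

theorem clP_two_le (n : Nat) (h : 2 ≤ n) : clP n = Nat.clog 2 n := by
  have : 0 < Nat.clog 2 n := Nat.clog_pos (by omega) (by omega)
  unfold clP; omega

theorem low_lt (n : Nat) (h : 2 ≤ n) : 2 ^ (clP n - 1) < n := by
  rw [clP_two_le n h]
  exact Nat.pow_pred_clog_lt_self (by omega) (by omega)

theorem le_pow_clP (n : Nat) (h : 1 ≤ n) : n ≤ 2 ^ clP n := by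
  calc n ≤ 2 ^ Nat.clog 2 n := Nat.le_pow_clog (b := 2) (by omega) n
    _ ≤ 2 ^ clP n := Nat.pow_le_pow_right (by omega) (le_max_right 1 _)

theorem low_le (n : Nat) (h : 1 ≤ n) : 2 ^ (clP n - 1) ≤ n := by
  rcases Nat.lt_or_ge n 2 with h2 | h2
  · have : n = 1 := by omega
    subst this
    simp [clP]
  · exact le_of_lt (low_lt n h2)

-- the central step identity: B's count satisfies A's greedy recursion
theorem SB_step (n : Nat) (h : 0 < n) : SB n = SB (n - 2 ^ (clP n - 1)) + 1 := by
  induction n using Nat.strong_induction_on with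
  | _ n ih =>
    rcases Nat.lt_or_ge n 2 with h2 | h2
    · -- n = 1
      have : n = 1 := by omega
      subst this
      have h1 : SB 1 = 1 := by
        rw [SB, tzB_odd 1 0 (by omega)]
        simp [onesB_eq, show pc 1 = 1 by rw [pc]; simp [pc_zero]]
      have h0 : SB 0 = 0 := by
        rw [SB, tzB, dif_neg (by omega)]
        simp [onesB_eq, pc_zero]
      simp [clP, h1, h0]
    · rcases Nat.even_or_odd n with he | ho
      · -- even case
        have hmod0 : n % 2 = 0 := Nat.even_iff.mp he
        obtain ⟨a, rfl⟩ : ∃ a, n = 2 * a := ⟨n / 2, by omega⟩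
        have ha1 : 1 ≤ a := by omega
        rcases Nat.lt_or_ge a 2 with ha2 | ha2
        · -- a = 1, n = 2
          have : a = 1 := by omega
          subst this
          have hc : clP 2 = 1 := by rw [clP_two_le 2 (by omega), clog_eq_of 1 2 (by norm_num) (by norm_num) (by omega)]
          rw [hc]
          norm_num
          exact SB_even 1 (by omega)
        · -- a ≥ 2
          have hca : 1 ≤ Nat.clog 2 a := Nat.clog_pos (by omega) (by omega)
          have hlow : 2 ^ (clP a - 1) < a := low_lt a ha2
          have hhi : a ≤ 2 ^ clP a := le_pow_clP a (by omega)
          have hcl2a : Nat.clog 2 (2 * a) = clP a + 1 := by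
            apply clog_eq_of
            · rw [Nat.add_sub_cancel]
              calc 2 ^ clP a = 2 * 2 ^ (clP a - 1) := by
                    rw [← pow_succ']
                    congr 1
                    have := clP_pos a
                    omega
                _ < 2 * a := by omega
            · calc 2 * a ≤ 2 * 2 ^ clP a := by omega
                _ = 2 ^ (clP a + 1) := by ring
            · omega
          have hcl2 : clP (2 * a) = clP a + 1 := by
            rw [clP_two_le (2 * a) (by omega), hcl2a]
          rw [hcl2, Nat.add_sub_cancel]
          have hsplit : 2 * a - 2 ^ clP a = 2 * (a - 2 ^ (clP a - 1)) := by
            have : 2 ^ clP a = 2 * 2 ^ (clP a - 1) := by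
              rw [← pow_succ']
              congr 1
              have := clP_pos a
              omega
            omega
          rw [hsplit, SB_even a (by omega), SB_even (a - 2 ^ (clP a - 1)) (by omega),
              ih a (by omega) (by omega)]
      · -- odd case, n ≥ 3
        obtain ⟨b, hb⟩ := ho
        have hmod : n % 2 = 1 := by omega
        have hc1 : 1 ≤ Nat.clog 2 n := Nat.clog_pos (by omega) (by omega)
        have hc2 : 2 ≤ clP n := by
          rw [clP_two_le n h2]
          have : 2 ^ 1 < n := by omega
          have := (Nat.pow_lt_iff_lt_clog (by omega : 1 < 2)).mp this
          omega
        have hlow : 2 ^ (clP n - 1) < n := low_lt n h2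
        have hne : n ≠ 2 ^ clP n := by
          intro hcontra
          have : 2 ^ clP n % 2 = 0 := by
            have h1 := clP_pos n
            obtain ⟨c, hc⟩ : ∃ c, clP n = c + 1 := ⟨clP n - 1, by omega⟩
            rw [hc, pow_succ']
            omega
          omega
        have hhi : n < 2 ^ clP n := lt_of_le_of_ne (le_pow_clP n (by omega)) hne
        have hhi' : n < 2 ^ ((clP n - 1) + 1) := by
          have : (clP n - 1) + 1 = clP n := by omega
          rw [this]; exact hhi
        have hpc := pc_sub_top (clP n - 1) n (le_of_lt hlow) hhi'
        have heven : 2 ^ (clP n - 1) % 2 = 0 := by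
          obtain ⟨c, hc⟩ : ∃ c, clP n - 1 = c + 1 := ⟨clP n - 2, by omega⟩
          rw [hc, pow_succ']
          omega
        have hodd' : (n - 2 ^ (clP n - 1)) % 2 = 1 := by omega
        rw [SB_odd n hmod, SB_odd (n - 2 ^ (clP n - 1)) hodd', hpc]

-- characterisation of A's helper power on 1 ≤ k ≤ 2^20
theorem powerLoop_spec (k : Int) (c : Nat) (hc1 : 1 ≤ c) (hc20 : c ≤ 20)
    (hlow : ∀ j : Nat, 1 ≤ j → j < c → (2:Int) ^ j < k)
    (hhi : k ≤ (2:Int) ^ c) :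
    ∀ d (i : Nat), i + d = 21 → 1 ≤ i → i ≤ c →
      powerLoop k (PySem.List.pyRange (i : Int) 21 1) = some ((2:Int) ^ c) := by
  intro d
  induction d with
  | zero => intro i h21 h1 hic; omega
  | succ d ih =>
    intro i h21 h1 hic
    rw [PySem.List.pyRange_one_cons (by exact_mod_cast (by omega : (i:Int) < 21))]
    rw [powerLoop]
    have hti : ((i : Int)).toNat = i := Int.toNat_natCast i
    by_cases hec : i = c
    · subst hec
      rw [hti, if_pos (by exact hhi)]
    · have hlt : i < c := lt_of_le_of_ne hic hec
      have hlti : (2:Int) ^ i < k := hlow i h1 hlt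
      rw [hti, if_neg (by omega)]
      have : ((i : Int) + 1) = ((i + 1 : Nat) : Int) := by push_cast; ring
      rw [this]
      exact ih (i + 1) (by omega) (by omega) (by omega)

theorem power_spec (n : Nat) (h1 : 1 ≤ n) (h20 : n ≤ 2 ^ 20) :
    power ((n : Nat) : Int) = some ((2:Int) ^ clP n) := by
  have hc1 : 1 ≤ clP n := clP_pos n
  have hc20 : clP n ≤ 20 := by
    rcases Nat.lt_or_ge n 2 with h2 | h2
    · have : n = 1 := by omega
      subst this; simp [clP]
    · rw [clP_two_le n h2]
      calc Nat.clog 2 n ≤ Nat.clog 2 (2 ^ 20) := Nat.clog_mono_right 2 h20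
        _ = 20 := Nat.clog_pow 2 20 (by omega)
  have hlow : ∀ j : Nat, 1 ≤ j → j < clP n → (2:Int) ^ j < (n : Int) := by
    intro j hj1 hjc
    rcases Nat.lt_or_ge n 2 with h2 | h2
    · have : n = 1 := by omega
      subst this; simp [clP] at hjc; omega
    · rw [clP_two_le n h2] at hjc
      have : (2:Nat) ^ j < n := (Nat.pow_lt_iff_lt_clog (by omega)).mpr hjc
      exact_mod_cast this
  have hhi : ((n : Nat) : Int) ≤ (2:Int) ^ clP n := by
    have := le_pow_clP n h1
    exact_mod_cast this
  unfold power
  exact powerLoop_spec (n : Int) (clP n) hc1 hc20 hlow hhi 20 1 (by omega) (by omega) hc1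

theorem chocoLoop_nonpos (fuel : Nat) (k cnt last : Int) (h : ¬ k > 0) :
    chocoLoop fuel k cnt last = cnt := by
  cases fuel with
  | zero => rfl
  | succ f => rw [chocoLoop, if_neg h]

theorem floordiv_pow (c : Nat) (h : 1 ≤ c) :
    PySem.Int.floordiv ((2:Int) ^ c) 2 = (2:Int) ^ (c - 1) := by
  rw [PySem.Int.floordiv_eq_ediv_of_pos (by omega)]
  obtain ⟨c', rfl⟩ : ∃ c', c = c' + 1 := ⟨c - 1, by omega⟩
  rw [pow_succ]
  simp

theorem chocoLoop_spec (n : Nat) : 0 < n → n ≤ 2 ^ 20 →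
    ∀ (fuel : Nat) (cnt last : Int), n < fuel →
      chocoLoop fuel ((n : Nat) : Int) cnt last = cnt + SB n := by
  induction n using Nat.strong_induction_on with
  | _ n ih =>
    intro hpos h20 fuel cnt last hfuel
    obtain ⟨f, rfl⟩ : ∃ f, fuel = f + 1 := ⟨fuel - 1, by omega⟩
    rw [chocoLoop, if_pos (by exact_mod_cast hpos), power_spec n hpos h20]
    simp only
    rw [floordiv_pow (clP n) (clP_pos n)]
    have hlowle : 2 ^ (clP n - 1) ≤ n := low_le n hpos
    have hcast : ((n : Nat) : Int) - (2:Int) ^ (clP n - 1) = (((n - 2 ^ (clP n - 1) : Nat)) : Int) := by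
      push_cast [hlowle]
      ring
    rw [if_pos (by rw [hcast]; positivity)]
    rw [hcast]
    set m := n - 2 ^ (clP n - 1) with hm
    have hlow1 : 1 ≤ 2 ^ (clP n - 1) := Nat.one_le_two_pow
    by_cases hm0 : m = 0
    · rw [hm0, Nat.cast_zero]
      rw [chocoLoop_nonpos f 0 (cnt + 1) _ (by omega)]
      have hn1 : n = 2 ^ (clP n - 1) := by omega
      rw [SB_step n hpos, ← hm, hm0]
      have h0 : SB 0 = 0 := by
        rw [SB, tzB, dif_neg (by omega)]
        simp [onesB_eq, pc_zero]
      rw [h0]; ring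
    · rw [ih m (by omega) (by omega) (by omega) f (cnt + 1) _ (by omega)]
      rw [SB_step n hpos, ← hm]
      ring

theorem pc_pow (e : Nat) : pc (2 ^ e) = 1 := by
  induction e with
  | zero => rw [pc]; simp [pc_zero]
  | succ e ih => rw [pow_succ', pc_two_mul, ih]

theorem choco_alt_eq_SB (k : Int) (h : 0 < k) : choco_alt k = SB k.toNat := by
  rw [choco_alt, if_neg (by omega)]
  rfl

-- ===== VERDICT (by name: the statement is the Claim_ definition above) =====
theorem choco_spec : Claim_equal_choco := by
  unfold Claim_equal_choco
  intro k _ hpre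
  unfold Spec_choco Pre_choco at *
  by_cases hk : k ≤ 0
  · rw [choco_alt, if_pos hk]
    unfold choco
    exact chocoLoop_nonpos _ k 0 1 (by omega)
  · have hk0 : 0 < k := by omega
    have hkn : ((k.toNat : Nat) : Int) = k := Int.toNat_of_nonneg (by omega)
    obtain ⟨n, rfl⟩ : ∃ n : Nat, ((n : Nat) : Int) = k := ⟨k.toNat, hkn⟩
    have hn0 : 0 < n := by exact_mod_cast hk0
    have h20 : n ≤ 2 ^ 20 := by exact_mod_cast hpre
    rw [choco_alt_eq_SB _ hk0]
    unfold choco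
    rw [Int.toNat_natCast]
    rw [chocoLoop_spec n hn0 h20 (n + 1) 0 1 (by omega)]
    ring

@[simp] theorem choco_raises : Claim_raises_choco := by
  unfold Claim_raises_choco
  constructor
  · intro k _ hr
    unfold Raises_choco at hr
    unfold Pre_choco
    omega
  · refine ⟨by decide, by decide, ?_⟩
    have hodd : (1048577 : Nat) % 2 = 1 := by norm_num
    show choco_alt 1048577 = 2
    rw [choco_alt, if_neg (by norm_num)]
    have ht : (1048577 : Int).toNat = 1048577 := rfl
    rw [ht]
    show onesB (tzB 1048577 0).1 0 + (tzB 1048577 0).2 = 2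
    rw [tzB_odd 1048577 0 hodd]
    simp only [onesB_eq]
    have h1 : (1048577 : Nat) = 2 * 524288 + 1 := by norm_num
    rw [h1, pc_two_mul_add_one, show (524288 : Nat) = 2 ^ 19 by norm_num, pc_pow]
    norm_num
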